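-- pv_equiv track=rewrite | github.com/YuanWind/GoToNLP | utils.py | get_batches_by_len
-- ===== SOURCE A (Python) =====
-- def get_batches_by_len(data_x, data_y, batch_size=32):
--     """
--     批数据生成器
--     :param data_x: 数据x
--     :param data_y: 标签y
--     :param batch_size:设置最大的batch_size
--     :param shuffle: 是否打乱顺序
--     :return:
--     """
--     seq_len={} #len_x---idxs
--     for idx,x in enumerate(data_x):
--         len_x=len(x)
--         if len_x not in seq_len.keys():
--             seq_len[len_x]=[idx]
--         else:
--             seq_len[len_x].append(idx)
--     for len_x,idxs in seq_len.items():
--         total_x=len(idxs)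
--         sum_x=0
--         if total_x <= batch_size:
--             X, y = [], []
--             for idx in idxs:
--                 X.append(data_x[idx])
--                 y.append(data_y[idx])
--             true_len = [len(X[0]) for _ in range(len(y))]
--             yield X, y,true_len
--         else:
--             X, y = [], []
--             for idx in idxs:
--                 X.append(data_x[idx])
--                 y.append(data_y[idx])
--                 sum_x+=1
--                 if sum_x==batch_size:
--                     true_len = [len(X[0]) for _ in range(len(y))]
--                     yield X, y,true_len
--                     X, y = [], []
--                     sum_x=0
--             if len(y)!=0: # 如果batch_size=8,而idxs有18项，那么最后就会返回一个空的batch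
--                 true_len = [len(X[0]) for _ in range(len(y))]
--                 yield X, y, true_len
-- ===== SOURCE B (Python) =====
-- def get_batches_by_len(data_x, data_y, batch_size=32):
--     seq_len = {}  # len_x -> idxs
--     for idx, x in enumerate(data_x):
--         seq_len.setdefault(len(x), []).append(idx)
--     for idxs in seq_len.values():
--         for i in range(0, len(idxs), batch_size):
--             chunk = idxs[i:i + batch_size]
--             X = [data_x[j] for j in chunk]
--             y = [data_y[j] for j in chunk]
--             yield X, y, [len(X[0])] * len(y)
-- ===== Notes on version B (the rewrite author's own statement) =====
-- stated objective: simpler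
-- what changed: B keeps the length-grouping dict but replaces A's dual code path (whole-group branch plus a running sum_x counter with mid-loop flushes and a leftover yield) by a single slice-based chunking pass: for each group it takes idxs[i:i+batch_size] for i in range(0, len(idxs), batch_size).
-- outside the precondition, e.g. on get_batches_by_len([[0]], [0], 0): A returns [([[0]], [0], [1])], B raises ValueError; on get_batches_by_len([[0]], [0], -1): A returns [([[0]], [0], [1])], B returns []
import Mathlib
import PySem

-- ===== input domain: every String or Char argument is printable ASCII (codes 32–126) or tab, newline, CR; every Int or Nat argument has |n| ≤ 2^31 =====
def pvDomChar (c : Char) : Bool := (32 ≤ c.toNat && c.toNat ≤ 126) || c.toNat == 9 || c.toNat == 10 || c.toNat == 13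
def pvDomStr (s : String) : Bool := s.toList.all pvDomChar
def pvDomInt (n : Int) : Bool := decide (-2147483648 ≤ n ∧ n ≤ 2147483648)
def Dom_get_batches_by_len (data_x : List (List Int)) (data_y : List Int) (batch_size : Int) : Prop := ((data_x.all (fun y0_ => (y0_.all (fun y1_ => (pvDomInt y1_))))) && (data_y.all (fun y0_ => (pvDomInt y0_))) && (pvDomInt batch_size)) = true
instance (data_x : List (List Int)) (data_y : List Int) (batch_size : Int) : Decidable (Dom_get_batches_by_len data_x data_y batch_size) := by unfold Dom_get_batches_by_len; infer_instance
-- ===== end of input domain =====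

-- B replaces A's dual code path (whole-group branch + running sum_x counter with mid-loop
-- flushes and a leftover yield) by one slice-based chunking pass per length group (simpler).


-- ===== PORT A =====
-- A's else-branch loop over a group's idxs (generator: a yield emits a batch now),
-- with the trailing 'if len(y)!=0: yield' folded into the end-of-list case.
def pvGroupA (data_x : List (List Int)) (data_y : List Int) (batch_size : Int)
    (X : List (List Int)) (y : List Int) (sum_x : Int) :
    List Int → List (List (List Int) × List Int × List Int)
  | [] =>
      if y.length ≠ 0 then
        [(X, y, List.replicate y.length ((PySem.List.pyGetD X 0 []).length : Int))]
      else []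
  | idx :: rest =>
      let X' := X ++ [PySem.List.pyGetD data_x idx []]
      let y' := y ++ [PySem.List.pyGetD data_y idx 0]
      let s' := sum_x + 1
      if s' = batch_size then
        (X', y', List.replicate y'.length ((PySem.List.pyGetD X' 0 []).length : Int)) ::
          pvGroupA data_x data_y batch_size [] [] 0 rest
      else
        pvGroupA data_x data_y batch_size X' y' s' rest

def get_batches_by_len (data_x : List (List Int)) (data_y : List Int) (batch_size : Int) :
    List (List (List Int) × List Int × List Int) :=
  let seq_len : PySem.Dict Int (List Int) :=
    (PySem.List.enumerate data_x).foldl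
      (fun d p =>
        let len_x : Int := (p.2.length : Int)
        if d.contains len_x = false then d.insert len_x [p.1]
        else d.insert len_x (d.getD len_x [] ++ [p.1]))
      PySem.Dict.empty
  seq_len.items.foldl
    (fun acc p =>
      let idxs := p.2
      if (idxs.length : Int) ≤ batch_size then
        let Xy := idxs.foldl
          (fun (s : List (List Int) × List Int) idx =>
            (s.1 ++ [PySem.List.pyGetD data_x idx []], s.2 ++ [PySem.List.pyGetD data_y idx 0]))
          ([], [])
        acc ++ [(Xy.1, Xy.2, List.replicate Xy.2.length ((PySem.List.pyGetD Xy.1 0 []).length : Int))]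
      else
        acc ++ pvGroupA data_x data_y batch_size [] [] 0 idxs)
    []

-- ===== PORT B =====
-- one batch from one slice of a group's index list
def pvBatchB (data_x : List (List Int)) (data_y : List Int) (chunk : List Int) :
    List (List Int) × List Int × List Int :=
  let X := chunk.map (fun j => PySem.List.pyGetD data_x j [])
  let y := chunk.map (fun j => PySem.List.pyGetD data_y j 0)
  (X, y, PySem.List.pyRepeat [((PySem.List.pyGetD X 0 []).length : Int)] (y.length : Int))

def get_batches_by_len_alt (data_x : List (List Int)) (data_y : List Int) (batch_size : Int) :
    List (List (List Int) × List Int × List Int) :=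
  let seq_len : PySem.Dict Int (List Int) :=
    (PySem.List.enumerate data_x).foldl
      (fun d p => d.modify ((p.2.length : Int)) [] (· ++ [p.1]))
      PySem.Dict.empty
  seq_len.values.foldl
    (fun acc idxs =>
      acc ++ (PySem.List.pyRange 0 (idxs.length : Int) batch_size).map
        (fun i => pvBatchB data_x data_y (PySem.List.slice idxs (some i) (some (i + batch_size)))))
    []

-- ===== PRECONDITION & SPEC =====
-- Pre_ excludes (a) inputs where A raises IndexError (data_y shorter than data_x), and
-- (b) non-positive batch_size, a degenerate setting on which A accidentally yields each whole
-- group as one batch while B's range(0, len, batch_size) raises (step 0) or is empty (negative).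
def Pre_get_batches_by_len (data_x : List (List Int)) (data_y : List Int) (batch_size : Int) : Prop :=
  1 ≤ batch_size ∧ data_x.length ≤ data_y.length
instance (data_x : List (List Int)) (data_y : List Int) (batch_size : Int) : Decidable (Pre_get_batches_by_len data_x data_y batch_size) := by unfold Pre_get_batches_by_len; infer_instance

def pvWitness_get_batches_by_len : List (List Int) × List Int × Int :=
  ([[1], [2, 3], [4]], [10, 20, 30], 2)

def Spec_get_batches_by_len (data_x : List (List Int)) (data_y : List Int) (batch_size : Int) (out : List (List (List Int) × List Int × List Int)) : Prop := out = get_batches_by_len_alt data_x data_y batch_size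
instance (data_x : List (List Int)) (data_y : List Int) (batch_size : Int) (out : List (List (List Int) × List Int × List Int)) : Decidable (Spec_get_batches_by_len data_x data_y batch_size out) := by unfold Spec_get_batches_by_len; infer_instance

-- ===== CLAIM (what is proved, stated in full; the proofs are below) =====
def Claim_equal_get_batches_by_len : Prop := ∀ (data_x : List (List Int)) (data_y : List Int) (batch_size : Int), Dom_get_batches_by_len data_x data_y batch_size → Pre_get_batches_by_len data_x data_y batch_size → Spec_get_batches_by_len data_x data_y batch_size (get_batches_by_len data_x data_y batch_size)

-- ===== LEMMAS AND PROOFS =====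

-- reference chunker both per-group computations are reduced to
def pvChunks (bs' : Nat) (data_x : List (List Int)) (data_y : List Int) :
    List Int → List (List (List Int) × List Int × List Int)
  | [] => []
  | j :: rest =>
      pvBatchB data_x data_y ((j :: rest).take bs') :: pvChunks bs' data_x data_y (rest.drop (bs' - 1))
termination_by l => l.length
decreasing_by simp [List.length_drop]

theorem pvChunks_cons (bs' : Nat) (hbs : 1 ≤ bs') (data_x : List (List Int)) (data_y : List Int)
    (j : Int) (rest : List Int) :
    pvChunks bs' data_x data_y (j :: rest) =
      pvBatchB data_x data_y ((j :: rest).take bs') :: pvChunks bs' data_x data_y ((j :: rest).drop bs') := by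
  obtain ⟨k, rfl⟩ : ∃ k, bs' = k + 1 := ⟨bs' - 1, by omega⟩
  rw [pvChunks]
  simp [List.drop_succ_cons]

theorem pvChunks_ne_nil (bs' : Nat) (hbs : 1 ≤ bs') (data_x : List (List Int)) (data_y : List Int)
    (l : List Int) (hl : l ≠ []) :
    pvChunks bs' data_x data_y l =
      pvBatchB data_x data_y (l.take bs') :: pvChunks bs' data_x data_y (l.drop bs') := by
  cases l with
  | nil => exact absurd rfl hl
  | cons j rest => exact pvChunks_cons bs' hbs data_x data_y j rest

theorem pvBatchB_full (data_x : List (List Int)) (data_y : List Int) (c : List Int) :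
    pvBatchB data_x data_y c =
      (c.map (fun j => PySem.List.pyGetD data_x j []),
       c.map (fun j => PySem.List.pyGetD data_y j 0),
       List.replicate (c.map (fun j => PySem.List.pyGetD data_y j 0)).length
         ((PySem.List.pyGetD (c.map (fun j => PySem.List.pyGetD data_x j [])) 0 []).length : Int)) := by
  simp [pvBatchB, PySem.List.pyRepeat_singleton]

-- A's counter loop computes the reference chunking
theorem pvGroupA_eq_chunks (data_x : List (List Int)) (data_y : List Int) (batch_size : Int)
    (hbs : 1 ≤ batch_size) :
    ∀ (idxs pfx : List Int), (pfx.length : Int) < batch_size →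
      pvGroupA data_x data_y batch_size
          (pfx.map (fun j => PySem.List.pyGetD data_x j []))
          (pfx.map (fun j => PySem.List.pyGetD data_y j 0))
          (pfx.length : Int) idxs
        = pvChunks batch_size.toNat data_x data_y (pfx ++ idxs) := by
  intro idxs
  induction idxs with
  | nil =>
      intro pfx hlen
      cases pfx with
      | nil => simp [pvGroupA, pvChunks]
      | cons p ps =>
          have hle : (p :: ps).length ≤ batch_size.toNat := by
            simp only [List.length_cons] at hlen ⊢
            omega
          rw [pvGroupA, List.append_nil,
            pvChunks_ne_nil _ (by omega) _ _ _ (by simp),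
            List.take_of_length_le hle, List.drop_of_length_le hle]
          simp [pvChunks, pvBatchB_full]
  | cons idx rest ih =>
      intro pfx hlen
      rw [pvGroupA]
      by_cases hb : (pfx.length : Int) + 1 = batch_size
      · rw [if_pos hb]
        have hq : (pfx ++ [idx]).length = batch_size.toNat := by
          simp only [List.length_append, List.length_singleton]
          omega
        rw [show pfx ++ idx :: rest = (pfx ++ [idx]) ++ rest by simp]
        rw [pvChunks_ne_nil _ (by omega) _ _ _ (by simp),
          List.take_left' hq, List.drop_left' hq]
        have htail := ih [] (by simpa using hbs)
        simp only [List.map_nil, List.length_nil, Nat.cast_zero, List.nil_append] at htail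
        rw [htail]
        rw [pvBatchB_full]
        simp [List.map_append]
      · rw [if_neg hb]
        have htail := ih (pfx ++ [idx]) (by
          simp only [List.length_append, List.length_singleton]
          push_cast
          omega)
        simp only [List.map_append, List.map_cons, List.map_nil, List.length_append,
          List.length_singleton, List.append_assoc, List.singleton_append] at htail
        push_cast at htail
        simpa using htail

theorem pyRange_nonpos (m bs : Int) (hm : m ≤ 0) (hbs : 0 < bs) :
    PySem.List.pyRange 0 m bs = [] := by
  rw [PySem.List.pyRange_of_pos _ _ hbs]
  simp [show ¬ (0 < m) by omega]

theorem pyRange_chunk_step (m bs : Int) (hm : 0 < m) (hbs : 0 < bs) :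
    PySem.List.pyRange 0 m bs = 0 :: (PySem.List.pyRange 0 (m - bs) bs).map (· + bs) := by
  rw [PySem.List.pyRange_of_pos _ _ hbs, PySem.List.pyRange_of_pos _ _ hbs]
  by_cases h : 0 < m - bs
  · have hq : 0 ≤ (m - bs - 0 + bs - 1) / bs := Int.ediv_nonneg (by omega) (by omega)
    have hcnt : ((m - 0 + bs - 1) / bs).toNat = ((m - bs - 0 + bs - 1) / bs).toNat + 1 := by
      have h1 : m - 0 + bs - 1 = (m - bs - 0 + bs - 1) + 1 * bs := by ring
      rw [h1, Int.add_mul_ediv_right _ _ (by omega : bs ≠ 0)]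
      omega
    simp only [hm, h, if_pos]
    rw [hcnt, List.range_succ_eq_map]
    simp only [List.map_cons, List.map_map]
    congr 1
    · simp
    · apply List.map_congr_left
      intro k _
      simp [Function.comp]
      ring
  · have hone : (m - 0 + bs - 1) / bs = 1 := by
      rw [← PySem.Int.floordiv_eq_ediv_of_pos hbs]
      exact (PySem.Int.floordiv_eq_iff_of_pos hbs).mpr ⟨by omega, by omega⟩
    simp only [hm, if_pos, if_neg h, hone]
    simp [List.range_succ]

-- B's slice loop computes the reference chunking
theorem pvMapSlices_eq_chunks (data_x : List (List Int)) (data_y : List Int) (batch_size : Int)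
    (hbs : 1 ≤ batch_size) :
    ∀ (idxs : List Int),
      (PySem.List.pyRange 0 (idxs.length : Int) batch_size).map
          (fun i => pvBatchB data_x data_y (PySem.List.slice idxs (some i) (some (i + batch_size))))
        = pvChunks batch_size.toNat data_x data_y idxs := by
  have hbs0 : 0 < batch_size := by omega
  suffices H : ∀ (n : Nat) (idxs : List Int), idxs.length = n →
      (PySem.List.pyRange 0 (idxs.length : Int) batch_size).map
          (fun i => pvBatchB data_x data_y (PySem.List.slice idxs (some i) (some (i + batch_size))))
        = pvChunks batch_size.toNat data_x data_y idxs by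
    exact fun idxs => H idxs.length idxs rfl
  intro n
  induction n using Nat.strong_induction_on with
  | _ n ih =>
    intro idxs hn
    cases idxs with
    | nil =>
        rw [pyRange_nonpos _ _ (by simp) hbs0]
        simp [pvChunks]
    | cons j rest =>
        rw [pyRange_chunk_step _ _ (by exact_mod_cast Nat.succ_pos rest.length) hbs0,
          List.map_cons, List.map_map,
          pvChunks_ne_nil _ (by omega) _ _ _ (by simp)]
        congr 1
        · congr 1
          rw [show (0:Int) + batch_size = ((batch_size.toNat : Nat) : Int) by omega,
            show (0:Int) = ((0:Nat) : Int) by simp,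
            PySem.List.slice_natCast]
          simp
        · have hre : PySem.List.pyRange 0 (((j :: rest).length : Int) - batch_size) batch_size
              = PySem.List.pyRange 0 ((((j :: rest).drop batch_size.toNat).length : Int)) batch_size := by
            rw [List.length_drop]
            by_cases hc : batch_size < ((j :: rest).length : Int)
            · congr 1
              omega
            · have hle : (j :: rest).length - batch_size.toNat = 0 := by omega
              rw [pyRange_nonpos _ _ (by omega) hbs0,
                pyRange_nonpos _ _ (by rw [hle]; simp) hbs0]
          rw [hre]
          rw [List.map_congr_left (g := fun i => pvBatchB data_x data_y
              (PySem.List.slice ((j :: rest).drop batch_size.toNat) (some i) (some (i + batch_size)))) ?_]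
          · exact ih ((j :: rest).drop batch_size.toNat).length
              (by subst hn; rw [List.length_drop]; simp only [List.length_cons]; omega) _ rfl
          · intro i hi
            have hi0 : 0 ≤ i := by
              have := (PySem.List.mem_pyRange_iff_of_pos hbs0 i).mp hi
              omega
            obtain ⟨a, rfl⟩ : ∃ a : Nat, i = (a : Int) := ⟨i.toNat, (Int.toNat_of_nonneg hi0).symm⟩
            simp only [Function.comp]
            congr 1
            rw [show (a : Int) + batch_size + batch_size
                  = ((a + batch_size.toNat + batch_size.toNat : Nat) : Int) by push_cast; omega,
              show (a : Int) + batch_size = ((a + batch_size.toNat : Nat) : Int) by push_cast; omega,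
              PySem.List.slice_natCast, PySem.List.slice_natCast, List.drop_drop]
            congr 1
            · omega
            · congr 1
              omega

-- the two grouping dicts are equal
theorem pvDict_eq (data_x : List (List Int)) :
    (PySem.List.enumerate data_x).foldl
        (fun (d : PySem.Dict Int (List Int)) p =>
          let len_x : Int := (p.2.length : Int)
          if d.contains len_x = false then d.insert len_x [p.1]
          else d.insert len_x (d.getD len_x [] ++ [p.1]))
        PySem.Dict.empty
      = (PySem.List.enumerate data_x).foldl
          (fun (d : PySem.Dict Int (List Int)) p => d.modify ((p.2.length : Int)) [] (· ++ [p.1]))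
          PySem.Dict.empty := by
  apply PySem.List.foldl_congr_mem
  intro acc p _
  simp only [PySem.Dict.modify]
  cases h : acc.contains ((p.2.length : Int)) with
  | false =>
      rw [if_pos rfl, PySem.Dict.getD_of_not_contains _ _ h]
      simp
  | true =>
      rw [if_neg (by simp)]

-- every value list of the grouping dict is nonempty
theorem pvDict_values_ne_nil (data_x : List (List Int)) :
    ∀ v ∈ ((PySem.List.enumerate data_x).foldl
        (fun (d : PySem.Dict Int (List Int)) p => d.modify ((p.2.length : Int)) [] (· ++ [p.1]))
        PySem.Dict.empty).values, v ≠ [] := by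
  suffices H : ∀ (l : List (Int × List Int)) (d : PySem.Dict Int (List Int)),
      (∀ v ∈ d.values, v ≠ []) →
      ∀ v ∈ (l.foldl (fun d p => d.modify ((p.2.length : Int)) [] (· ++ [p.1])) d).values, v ≠ [] by
    exact H _ _ (by simp [PySem.Dict.values, PySem.Dict.empty])
  intro l
  induction l with
  | nil => intro d h; simpa using h
  | cons p t ih =>
      intro d h
      apply ih
      intro v hv
      simp only [PySem.Dict.modify] at hv
      rcases PySem.Dict.mem_values_insert _ _ _ _ hv with h1 | h2
      · subst h1; simp [PySem.Dict.getD]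
      · exact h v h2

-- ===== VERDICT (by name: the statement is the Claim_ definition above) =====
theorem get_batches_by_len_spec : Claim_equal_get_batches_by_len := by
  intro data_x data_y batch_size _ hpre
  obtain ⟨hbs, _⟩ := hpre
  unfold Spec_get_batches_by_len get_batches_by_len get_batches_by_len_alt
  rw [pvDict_eq]
  simp only [PySem.Dict.values]
  rw [List.foldl_map]
  apply PySem.List.foldl_congr_mem
  intro acc p hp
  have hne : p.2 ≠ [] := by
    apply pvDict_values_ne_nil data_x
    exact List.mem_map_of_mem hp
  rw [pvMapSlices_eq_chunks data_x data_y batch_size hbs p.2]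
  by_cases hc : ((p.2.length : Nat) : Int) ≤ batch_size
  · rw [if_pos hc]
    congr 1
    rw [PySem.List.foldl_prod_mk
        (f := fun acc idx => acc ++ [PySem.List.pyGetD data_x idx []])
        (g := fun acc idx => acc ++ [PySem.List.pyGetD data_y idx 0]),
      PySem.List.foldl_append_singleton_eq_map, PySem.List.foldl_append_singleton_eq_map]
    have hle : p.2.length ≤ batch_size.toNat := by omega
    rw [pvChunks_ne_nil _ (by omega) _ _ _ hne,
      List.take_of_length_le hle, List.drop_of_length_le hle]
    simp [pvChunks, pvBatchB_full]
  · rw [if_neg hc]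
    congr 1
    have := pvGroupA_eq_chunks data_x data_y batch_size hbs p.2 [] (by simp; omega)
    simpa using this
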